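-- pv_equiv track=rewrite | github.com/leiyang2003/Short_videoGEN | scripts/generate_keyframes_atlas_i2i.py | parse_phases_arg
-- ===== SOURCE A (Python) =====
-- def parse_phases_arg(phases_arg: str) -> list[str]:
--     supported = {"start", "end"}
--     requested = [str(x).strip().lower() for x in str(phases_arg or "").split(",") if str(x).strip()]
--     if not requested:
--         requested = ["start", "end"]
--     ordered: list[str] = []
--     seen: set[str] = set()
--     for phase in requested:
--         if phase not in supported:
--             raise ValueError(f"未知 phases: {phase}。可选: start,end")
--         if phase not in seen:
--             ordered.append(phase)
--             seen.add(phase)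
--     return ordered
-- ===== SOURCE B (Python) =====
-- def parse_phases_arg(phases_arg: str) -> list[str]:
--     requested = [x.strip().lower() for x in str(phases_arg or "").split(",") if x.strip()]
--     if not requested:
--         return ["start", "end"]
--     for phase in requested:
--         if phase not in ("start", "end"):
--             raise ValueError(f"未知 phases: {phase}。可选: start,end")
--     if "end" not in requested:
--         return ["start"]
--     if "start" not in requested:
--         return ["end"]
--     if requested.index("start") < requested.index("end"):
--         return ["start", "end"]
--     return ["end", "start"]
-- ===== Notes on version B (the rewrite author's own statement) =====
-- stated objective: alternative
-- what changed: Replaces the fused validate/seen-set/accumulator dedup loop with a validation pass followed by a closed-form answer: since only 'start' and 'end' are supported, the result is read off from membership of each phase and a comparison of their first indices.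
import Mathlib
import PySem

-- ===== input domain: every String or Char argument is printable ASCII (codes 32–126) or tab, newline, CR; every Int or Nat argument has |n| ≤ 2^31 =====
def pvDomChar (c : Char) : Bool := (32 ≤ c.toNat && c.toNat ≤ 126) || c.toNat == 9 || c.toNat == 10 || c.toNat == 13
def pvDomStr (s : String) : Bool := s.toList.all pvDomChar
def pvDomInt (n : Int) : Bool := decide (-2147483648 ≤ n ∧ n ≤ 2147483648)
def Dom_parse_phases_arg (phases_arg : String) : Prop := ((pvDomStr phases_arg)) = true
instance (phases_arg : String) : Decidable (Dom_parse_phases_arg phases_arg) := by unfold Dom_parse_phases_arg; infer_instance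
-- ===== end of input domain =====

-- B replaces A's fused validate/dedup loop with a validation pass plus a closed-form
-- answer built from membership and first-index comparison of the two supported phases.

-- ===== PORT A =====
-- A's for-loop: validates each phase against supported and appends first occurrences;
-- 'none' marks the raised ValueError (those inputs are excluded by Pre_).
def pvGoA : List String → List String → PySem.Set String → Option (List String)
  | [], ordered, _ => some ordered
  | phase :: rest, ordered, seen =>
    if PySem.Set.contains (PySem.Set.ofList ["start", "end"]) phase then
      if PySem.Set.contains seen phase then pvGoA rest ordered seen
      else pvGoA rest (ordered ++ [phase]) (PySem.Set.add seen phase)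
    else none

def parse_phases_arg (phases_arg : String) : List String :=
  -- str(phases_arg or ""): '' is falsy, any other string is itself
  let s := if phases_arg == "" then "" else phases_arg
  let requested := (((PySem.Str.split? s ",").getD []).filter
      (fun x => !(PySem.Str.strip x == ""))).map (fun x => PySem.Str.lower (PySem.Str.strip x))
  let requested := if requested = [] then ["start", "end"] else requested
  (pvGoA requested [] PySem.Set.empty).getD []   -- none = ValueError, outside Pre_

-- ===== PORT B =====
def parse_phases_arg_alt (phases_arg : String) : List String :=
  let s := if phases_arg == "" then "" else phases_arg
  let requested := (((PySem.Str.split? s ",").getD []).filter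
      (fun x => !(PySem.Str.strip x == ""))).map (fun x => PySem.Str.lower (PySem.Str.strip x))
  if requested = [] then ["start", "end"]
  else if requested.all (fun p => p == "start" || p == "end") then
    -- validation loop passed; closed-form answer
    if "end" ∉ requested then ["start"]
    else if "start" ∉ requested then ["end"]
    else if (PySem.List.index? requested "start").getD 0 < (PySem.List.index? requested "end").getD 0
      then ["start", "end"]
      else ["end", "start"]
  else []   -- the raise path, outside Pre_

-- ===== PRECONDITION & SPEC =====
-- Pre_ excludes exactly the inputs on which A (and B) raise ValueError: some comma
-- token whose stripped lowercase form is nonempty and not "start"/"end".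
def Pre_parse_phases_arg (phases_arg : String) : Prop :=
  ∀ x ∈ (PySem.Str.split? phases_arg ",").getD [],
    PySem.Str.strip x = "" ∨ PySem.Str.lower (PySem.Str.strip x) = "start"
      ∨ PySem.Str.lower (PySem.Str.strip x) = "end"
instance (phases_arg : String) : Decidable (Pre_parse_phases_arg phases_arg) := by
  unfold Pre_parse_phases_arg; infer_instance
def pvWitness_parse_phases_arg : String := " End, start ,end"
def Spec_parse_phases_arg (phases_arg : String) (out : List String) : Prop :=
  out = parse_phases_arg_alt phases_arg
instance (phases_arg : String) (out : List String) : Decidable (Spec_parse_phases_arg phases_arg out) := by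
  unfold Spec_parse_phases_arg; infer_instance

-- ===== CLAIM (what is proved, stated in full; the proofs are below) =====
def Claim_equal_parse_phases_arg : Prop := ∀ (phases_arg : String), Dom_parse_phases_arg phases_arg → Pre_parse_phases_arg phases_arg → Spec_parse_phases_arg phases_arg (parse_phases_arg phases_arg)

-- ===== LEMMAS AND PROOFS =====

theorem pvGoA_both (l : List String) (ord : List String) (seen : PySem.Set String)
    (hv : ∀ p ∈ l, p = "start" ∨ p = "end")
    (hs : "start" ∈ seen) (he : "end" ∈ seen) :
    pvGoA l ord seen = some ord := by
  induction l generalizing ord with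
  | nil => rfl
  | cons p r ih =>
    rcases hv p (by simp) with h | h <;> subst h <;>
      simp_all [pvGoA, PySem.Set.contains, PySem.Set.ofList, PySem.Set.add, PySem.Set.empty]

theorem pvGoA_one (a b : String) (hab : a ≠ b) (hse : a = "start" ∨ a = "end")
    (hse' : b = "start" ∨ b = "end")
    (l : List String) (ord : List String) (seen : PySem.Set String)
    (hv : ∀ p ∈ l, p = "start" ∨ p = "end")
    (hs : a ∈ seen) (he : b ∉ seen) :
    pvGoA l ord seen = some (ord ++ if b ∈ l then [b] else []) := by
  induction l generalizing ord with
  | nil => simp [pvGoA]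
  | cons p r ih =>
    have hp := hv p (by simp)
    have hpa : p = a ∨ p = b := by
      rcases hp with h | h <;> rcases hse with ha | ha <;> rcases hse' with hb | hb <;>
        simp_all
    rcases hpa with h | h
    · subst h
      rw [show pvGoA (p :: r) ord seen = pvGoA r ord seen from by
        simp_all [pvGoA, PySem.Set.contains, PySem.Set.ofList, PySem.Set.add]]
      rw [ih ord (fun q hq => hv q (by simp [hq]))]
      have : b ∈ p :: r ↔ b ∈ r := by simp [hab.symm]
      simp [this]
    · subst h
      have h1 : pvGoA (p :: r) ord seen
          = pvGoA r (ord ++ [p]) (PySem.Set.add seen p) := by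
        simp_all [pvGoA, PySem.Set.contains, PySem.Set.ofList]
      rw [h1, pvGoA_both r (ord ++ [p]) _ (fun q hq => hv q (by simp [hq]))]
      · simp
      · rcases hse with ha | ha <;> rcases hse' with hb | hb <;>
          simp_all [PySem.Set.add, PySem.Set.contains]
      · rcases hse with ha | ha <;> rcases hse' with hb | hb <;>
          simp_all [PySem.Set.add, PySem.Set.contains]

theorem pvStartNeEnd : ("start" : String) ≠ "end" := by decide

-- the core equality on any nonempty validated list of phases
theorem pvCore (l : List String) (hne : l ≠ [])
    (hv : ∀ p ∈ l, p = "start" ∨ p = "end") :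
    (pvGoA l [] PySem.Set.empty).getD []
      = (if "end" ∉ l then ["start"]
         else if "start" ∉ l then ["end"]
         else if (PySem.List.index? l "start").getD 0 < (PySem.List.index? l "end").getD 0
           then ["start", "end"] else ["end", "start"]) := by
  match l, hne with
  | p :: r, _ =>
    have hvr : ∀ q ∈ r, q = "start" ∨ q = "end" := fun q hq => hv q (by simp [hq])
    rcases hv p (by simp) with h | h <;> subst h
    · -- head is "start"
      have h1 : pvGoA ("start" :: r) [] PySem.Set.empty
          = pvGoA r ["start"] (["start"] : PySem.Set String) := by
        simp [pvGoA, PySem.Set.contains, PySem.Set.ofList, PySem.Set.add, PySem.Set.empty]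
      rw [h1, pvGoA_one "start" "end" pvStartNeEnd (Or.inl rfl) (Or.inr rfl) r _ _ hvr
        (by simp) (by simp [pvStartNeEnd.symm])]
      by_cases hE : "end" ∈ r
      · have hmem : ("end" : String) ∈ "start" :: r := by simp [hE]
        rw [PySem.List.index?_cons_self]
        rw [PySem.List.index?_cons_of_ne _ pvStartNeEnd]
        obtain ⟨k, hk⟩ := Option.isSome_iff_exists.mp ((PySem.List.index?_isSome_iff r "end").2 hE)
        rw [PySem.List.index?_eq_idxOf?] at hk
        simp [hE, hmem, PySem.List.index?_eq_idxOf?, hk]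
      · have hnm : ("end" : String) ∉ "start" :: r := by simp [hE]
        simp [hE, hnm]
    · -- head is "end"
      have h1 : pvGoA ("end" :: r) [] PySem.Set.empty
          = pvGoA r ["end"] (["end"] : PySem.Set String) := by
        simp [pvGoA, PySem.Set.contains, PySem.Set.ofList, PySem.Set.add, PySem.Set.empty]
      rw [h1, pvGoA_one "end" "start" pvStartNeEnd.symm (Or.inr rfl) (Or.inl rfl) r _ _ hvr
        (by simp) (by simp [pvStartNeEnd])]
      by_cases hS : "start" ∈ r
      · have hmem : ("start" : String) ∈ "end" :: r := by simp [hS]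
        rw [PySem.List.index?_cons_self]
        rw [PySem.List.index?_cons_of_ne _ pvStartNeEnd.symm]
        obtain ⟨k, hk⟩ := Option.isSome_iff_exists.mp ((PySem.List.index?_isSome_iff r "start").2 hS)
        rw [PySem.List.index?_eq_idxOf?] at hk
        simp [hS, hmem, PySem.List.index?_eq_idxOf?, hk]
      · have hnm : ("start" : String) ∉ "end" :: r := by simp [pvStartNeEnd, hS]
        simp [hS, hnm]

-- ===== VERDICT (by name: the statement is the Claim_ definition above) =====
theorem parse_phases_arg_spec : Claim_equal_parse_phases_arg := by
  intro phases_arg _hdom hpre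
  unfold Spec_parse_phases_arg parse_phases_arg parse_phases_arg_alt
  have hs : (if phases_arg == "" then "" else phases_arg) = phases_arg := by
    by_cases h : phases_arg = "" <;> simp [h]
  dsimp only
  rw [hs]
  set req := ((PySem.Str.split? phases_arg ",").getD []).filter
      (fun x => !(PySem.Str.strip x == "")) |>.map
      (fun x => PySem.Str.lower (PySem.Str.strip x)) with hreq
  have hv : ∀ p ∈ req, p = "start" ∨ p = "end" := by
    intro p hp
    rw [hreq] at hp
    simp only [List.mem_map, List.mem_filter] at hp
    rcases hp with ⟨x, ⟨hx, hxs⟩, rfl⟩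
    rcases hpre x hx with h | h | h
    · simp [h] at hxs
    · exact Or.inl h
    · exact Or.inr h
  by_cases h0 : req = []
  · rw [if_pos h0, if_pos h0]
    decide
  · rw [if_neg h0, if_neg h0]
    have hall : req.all (fun p => p == "start" || p == "end") = true := by
      simp only [List.all_eq_true]
      intro p hp; rcases hv p hp with h | h <;> simp [h]
    rw [if_pos hall]
    exact pvCore req h0 hv
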